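-- pv_equiv track=rewrite | github.com/deepchem/deepchem | deepchem/utils/poly_converters.py | convert_smiles_to_SMARTS
-- ===== SOURCE A (Python) =====
-- def convert_smiles_to_SMARTS(smiles_string: str) -> str:
--     """
--     This function is used to convert the SMILES string to SMARTS string.
--
--     Parameters
--     ----------
--     smiles_string: str
--         The SMILES string to be converted.
--
--     Returns
--     -------
--     str
--         The converted SMARTS string.
--     """
--     counter = 1
--     mod_string = ""
--     for s in smiles_string:
--         if s == "*":
--             mod_string += f"[*:{counter}]"
--             counter += 1
--         else:
--             mod_string += s
--     return mod_string
-- ===== SOURCE B (Python) =====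
-- def convert_smiles_to_SMARTS(smiles_string: str) -> str:
--     parts = smiles_string.split('*')
--     pieces = [parts[0]]
--     for i, part in enumerate(parts[1:], 1):
--         pieces.append(f"[*:{i}]" + part)
--     return ''.join(pieces)
-- ===== Notes on version B (the rewrite author's own statement) =====
-- stated objective: faster
-- what changed: Replaces the per-character branch-and-concatenate loop by one split on the wildcard character into segments, then a join of the segments interleaved with the numbered tokens.
import Mathlib
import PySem

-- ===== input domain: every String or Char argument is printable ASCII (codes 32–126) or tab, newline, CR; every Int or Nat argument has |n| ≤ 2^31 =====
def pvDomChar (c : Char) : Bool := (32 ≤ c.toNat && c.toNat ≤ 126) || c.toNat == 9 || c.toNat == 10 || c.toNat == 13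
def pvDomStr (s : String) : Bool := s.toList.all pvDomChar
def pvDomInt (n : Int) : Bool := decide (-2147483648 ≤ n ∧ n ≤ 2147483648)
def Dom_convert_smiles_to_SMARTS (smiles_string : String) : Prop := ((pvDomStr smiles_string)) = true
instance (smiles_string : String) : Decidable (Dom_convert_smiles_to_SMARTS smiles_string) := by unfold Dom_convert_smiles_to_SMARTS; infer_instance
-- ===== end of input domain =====

-- B replaces A's per-character branch-and-concatenate loop by one split on the wildcard
-- character into segments joined with the numbered tokens interleaved (objective: faster).

-- ===== PORT A =====
-- counter/mod_string loop over the characters, literal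
def convert_smiles_to_SMARTS (smiles_string : String) : String :=
  let fin := smiles_string.toList.foldl
    (fun (st : Int × List Char) s =>
      if s = '*' then
        (st.1 + 1, st.2 ++ ('[' :: '*' :: ':' :: (PySem.Int.toChars st.1 ++ [']'])))
      else (st.1, st.2 ++ [s]))
    ((1 : Int), ([] : List Char))
  String.ofList fin.2

-- ===== PORT B =====
-- parts = s.split('*'); pieces = [parts[0]] + ['[*:i]'+part for i,part in enumerate(parts[1:],1)]; ''.join(pieces)
def convert_smiles_to_SMARTS_alt (smiles_string : String) : String :=
  let parts := PySem.Chars.splitOn smiles_string.toList ['*']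
  let pieces := (PySem.List.enumerate (parts.drop 1) 1).foldl
    (fun acc ip => acc ++ [('[' :: '*' :: ':' :: (PySem.Int.toChars ip.1 ++ [']'])) ++ ip.2])
    [parts.headD []]
  String.ofList (PySem.Chars.join [] pieces)

-- ===== PRECONDITION & SPEC =====
def Spec_convert_smiles_to_SMARTS (smiles_string : String) (out : String) : Prop := out = convert_smiles_to_SMARTS_alt smiles_string
instance (smiles_string : String) (out : String) : Decidable (Spec_convert_smiles_to_SMARTS smiles_string out) := by unfold Spec_convert_smiles_to_SMARTS; infer_instance

-- ===== CLAIM (what is proved, stated in full; the proofs are below) =====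
def Claim_equal_convert_smiles_to_SMARTS : Prop := ∀ (smiles_string : String), Dom_convert_smiles_to_SMARTS smiles_string → Spec_convert_smiles_to_SMARTS smiles_string (convert_smiles_to_SMARTS smiles_string)

-- ===== LEMMAS AND PROOFS =====

-- the numbered token "[*:k]"
def pvTok (k : Int) : List Char := '[' :: '*' :: ':' :: (PySem.Int.toChars k ++ [']'])

-- the output of A's loop from counter k, recursively
def pvBody : List Char → Int → List Char
  | [], _ => []
  | c :: cs, k => if c = '*' then pvTok k ++ pvBody cs (k + 1) else c :: pvBody cs k

-- split at '*' as (first segment, remaining segments)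
def pvSplit : List Char → List Char × List (List Char)
  | [] => ([], [])
  | c :: cs =>
    let p := pvSplit cs
    if c = '*' then ([], p.1 :: p.2) else (c :: p.1, p.2)

theorem pvFoldA (cs : List Char) : ∀ (k : Int) (p : List Char),
    (cs.foldl
      (fun (st : Int × List Char) s =>
        if s = '*' then
          (st.1 + 1, st.2 ++ ('[' :: '*' :: ':' :: (PySem.Int.toChars st.1 ++ [']'])))
        else (st.1, st.2 ++ [s])) (k, p)).2 = p ++ pvBody cs k := by
  induction cs with
  | nil => intro k p; simp [pvBody]
  | cons c cs ih =>
    intro k p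
    by_cases h : c = '*' <;> simp [List.foldl_cons, h, pvBody, pvTok, ih]

theorem pvGoSpec : ∀ (fuel : Nat) (l : List Char), l.length < fuel → ∀ (cur : List Char) (acc : List (List Char)),
    PySem.Chars.splitOn.go ['*'] fuel l cur acc
      = acc.reverse ++ (cur.reverse ++ (pvSplit l).1) :: (pvSplit l).2 := by
  intro fuel
  induction fuel with
  | zero => intro l h; omega
  | succ f ih =>
    intro l h cur acc
    cases l with
    | nil => simp [PySem.Chars.splitOn.go, pvSplit]
    | cons c rest =>
      by_cases hc : c = '*'
      · subst hc
        have : PySem.Chars.splitOn.go ['*'] (f + 1) ('*' :: rest) cur acc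
            = PySem.Chars.splitOn.go ['*'] f rest [] (cur.reverse :: acc) := by
          simp [PySem.Chars.splitOn.go, List.isPrefixOf]
        rw [this, ih rest (by simpa using Nat.lt_of_succ_lt_succ h)]
        simp [pvSplit]
      · have : PySem.Chars.splitOn.go ['*'] (f + 1) (c :: rest) cur acc
            = PySem.Chars.splitOn.go ['*'] f rest (c :: cur) acc := by
          simp [PySem.Chars.splitOn.go, List.isPrefixOf, (by simpa [eq_comm] using hc : ¬ '*' = c)]
        rw [this, ih rest (by simpa using Nat.lt_of_succ_lt_succ h)]
        simp [pvSplit, hc]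

theorem pvSplitOn_eq (cs : List Char) :
    PySem.Chars.splitOn cs ['*'] = (pvSplit cs).1 :: (pvSplit cs).2 := by
  have := pvGoSpec (cs.length + 1) cs (Nat.lt_succ_self _) [] []
  simpa [PySem.Chars.splitOn] using this

theorem pvJoinNilFlatten : ∀ (ps : List (List Char)), PySem.Chars.join [] ps = ps.flatten := by
  intro ps
  induction ps with
  | nil => simp [PySem.Chars.join_nil]
  | cons p rest ih =>
    cases rest with
    | nil => simp [PySem.Chars.join, List.intercalate]
    | cons q t => simp [PySem.Chars.join_cons_cons, ih]

theorem pvKey (cs : List Char) : ∀ (k : Int),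
    pvBody cs k = (pvSplit cs).1
      ++ ((PySem.List.enumerate (pvSplit cs).2 k).map (fun ip => pvTok ip.1 ++ ip.2)).flatten := by
  induction cs with
  | nil => intro k; simp [pvBody, pvSplit, PySem.List.enumerate_nil]
  | cons c cs ih =>
    intro k
    by_cases h : c = '*'
    · simp [pvBody, pvSplit, h, PySem.List.enumerate_cons, ih (k + 1)]
    · simp [pvBody, pvSplit, h, ih k]

-- ===== VERDICT (by name: the statement is the Claim_ definition above) =====
theorem convert_smiles_to_SMARTS_spec : Claim_equal_convert_smiles_to_SMARTS := by
  intro s _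
  unfold Spec_convert_smiles_to_SMARTS convert_smiles_to_SMARTS convert_smiles_to_SMARTS_alt
  simp only [pvSplitOn_eq, pvFoldA, PySem.List.foldl_append_singleton_eq_map, pvJoinNilFlatten,
    List.drop_succ_cons, List.drop_zero, List.headD_cons]
  simp [pvKey s.toList 1, pvTok]
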